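-- pv_equiv track=rewrite | github.com/zzxxww01/video-bilingual-subber-skill | scripts/download_youtube.py | pick_best_english_lang
-- ===== SOURCE A (Python) =====
-- from typing import Any
--
-- def pick_best_english_lang(tracks: dict[str, Any]) -> str | None:
--     if not isinstance(tracks, dict):
--         return None
--     keys = [key for key in tracks if isinstance(key, str)]
--     if not keys:
--         return None
--     preferred = ["en", "en-US", "en-GB", "en-CA", "en-AU", "en-orig"]
--     lowered = {key.lower(): key for key in keys}
--     for candidate in preferred:
--         exact = lowered.get(candidate.lower())
--         if exact:
--             return exact
--     english_keys = sorted(key for key in keys if key.lower().startswith("en"))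
--     return english_keys[0] if english_keys else None
-- ===== SOURCE B (Python) =====
-- def pick_best_english_lang(tracks):
--     if not isinstance(tracks, dict):
--         return None
--     preferred = ["en", "en-us", "en-gb", "en-ca", "en-au", "en-orig"]
--     best = None  # (rank, key); rank orders candidates, smaller = better
--     for key in tracks:
--         if not isinstance(key, str):
--             continue
--         lk = key.lower()
--         if lk in preferred:
--             rank = (0, preferred.index(lk), "")
--         elif lk.startswith("en"):
--             rank = (1, 0, key)
--         else:
--             continue
--         # '<=' so that a later key with an equal rank wins (dict last-wins rule)
--         if best is None or rank <= best[0]: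
--             best = (rank, key)
--     return best[1] if best is not None else None
-- ===== Notes on version B (the rewrite author's own statement) =====
-- stated objective: alternative
-- what changed: Replaces A's lowered-key dict plus preferred-candidate lookup loop plus separate sorted fallback with a single pass that assigns each key a lexicographic priority rank and keeps the running minimum (later key wins on rank ties, reproducing the dict's last-wins rule).
import Mathlib
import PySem

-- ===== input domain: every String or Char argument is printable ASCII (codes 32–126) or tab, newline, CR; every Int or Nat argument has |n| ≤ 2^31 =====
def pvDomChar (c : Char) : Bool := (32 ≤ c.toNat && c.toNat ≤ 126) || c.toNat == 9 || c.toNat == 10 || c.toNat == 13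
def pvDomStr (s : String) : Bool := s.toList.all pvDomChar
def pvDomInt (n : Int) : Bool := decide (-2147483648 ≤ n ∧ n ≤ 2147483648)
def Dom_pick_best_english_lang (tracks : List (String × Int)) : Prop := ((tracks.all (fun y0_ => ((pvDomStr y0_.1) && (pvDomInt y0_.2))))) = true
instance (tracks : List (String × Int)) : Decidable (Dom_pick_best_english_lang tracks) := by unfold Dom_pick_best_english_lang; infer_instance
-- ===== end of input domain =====

-- B replaces A's lowered-key dict + preferred-lookup loop + sorted fallback by a single rank-minimising pass (alternative decomposition, same result).

-- ===== PORT A =====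
-- the 'for candidate in preferred: exact = lowered.get(candidate.lower()); if exact: return exact' loop
def prefLoopA (lowered : PySem.Dict String String) : List String → Option String
  | [] => none
  | c :: rest =>
    match lowered.get? (PySem.Str.lower c) with
    | some exact => if exact ≠ "" then some exact else prefLoopA lowered rest
    | none => prefLoopA lowered rest

def pick_best_english_lang (tracks : List (String × Int)) : Option String :=
  let keys := tracks.map Prod.fst
  if keys = [] then none
  else
    let preferred := ["en", "en-US", "en-GB", "en-CA", "en-AU", "en-orig"]
    let lowered := keys.foldl (fun d k => d.insert (PySem.Str.lower k) k) PySem.Dict.empty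
    match prefLoopA lowered preferred with
    | some k => some k
    | none =>
      match PySem.List.sorted (keys.filter (fun k => PySem.Str.startswith (PySem.Str.lower k) "en")) (fun x => x) false with
      | [] => none
      | k :: _ => some k

-- ===== PORT B =====
def prefB : List String := ["en", "en-us", "en-gb", "en-ca", "en-au", "en-orig"]

-- Python tuple '<=' on (int, int, str), lexicographic
def rankLe (a b : Int × Int × String) : Bool :=
  a.1 < b.1 || (a.1 == b.1 && (a.2.1 < b.2.1 || (a.2.1 == b.2.1 && decide (a.2.2 ≤ b.2.2))))

-- 'if best is None or rank <= best[0]: best = (rank, key)'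
def updB (best : Option ((Int × Int × String) × String)) (r : Int × Int × String)
    (k : String) : Option ((Int × Int × String) × String) :=
  match best with
  | none => some (r, k)
  | some (br, _) => if rankLe r br then some (r, k) else best

-- the loop body of B
def stepB (best : Option ((Int × Int × String) × String)) (kv : String × Int) :
    Option ((Int × Int × String) × String) :=
  let k := kv.1
  let lk := PySem.Str.lower k
  if prefB.contains lk then
    updB best (0, (((PySem.List.index? prefB lk).getD 0 : Nat) : Int), "") k
  else if PySem.Str.startswith lk "en" then
    updB best (1, 0, k) k
  else best

def pick_best_english_lang_alt (tracks : List (String × Int)) : Option String :=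
  (tracks.foldl stepB none).map (fun p => p.2)

-- ===== PRECONDITION & SPEC =====
def Spec_pick_best_english_lang (tracks : List (String × Int)) (out : Option String) : Prop := out = pick_best_english_lang_alt tracks
instance (tracks : List (String × Int)) (out : Option String) : Decidable (Spec_pick_best_english_lang tracks out) := by unfold Spec_pick_best_english_lang; infer_instance

-- ===== CLAIM (what is proved, stated in full; the proofs are below) =====
def Claim_equal_pick_best_english_lang : Prop := ∀ (tracks : List (String × Int)), Dom_pick_best_english_lang tracks → Spec_pick_best_english_lang tracks (pick_best_english_lang tracks)

-- ===== LEMMAS AND PROOFS =====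

-- the LAST key of `keys` whose lowercase form is `c` (= the lowered dict's entry at c)
def lastAt (keys : List String) (c : String) : Option String :=
  keys.reverse.find? (fun k => PySem.Str.lower k == c)

-- running minimum of the english-prefixed keys (ties keep the newcomer; equal strings anyway)
def updMin (acc : Option String) (k : String) : Option String :=
  match acc with
  | none => some k
  | some b => if k ≤ b then some k else some b

def minEnP (keys : List String) : Option String :=
  keys.foldl (fun acc k =>
    if PySem.Str.startswith (PySem.Str.lower k) "en" then updMin acc k else acc) none

-- the common reference value, as a function of the six last-match slots and the fallback minimum
def F (a0 a1 a2 a3 a4 a5 m : Option String) : Option ((Int × Int × String) × String) :=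
  match a0 with
  | some k => some ((0, 0, ""), k)
  | none => match a1 with
    | some k => some ((0, 1, ""), k)
    | none => match a2 with
      | some k => some ((0, 2, ""), k)
      | none => match a3 with
        | some k => some ((0, 3, ""), k)
        | none => match a4 with
          | some k => some ((0, 4, ""), k)
          | none => match a5 with
            | some k => some ((0, 5, ""), k)
            | none => match m with
              | some x => some ((1, 0, x), x)
              | none => none

def R (keys : List String) : Option ((Int × Int × String) × String) :=
  F (lastAt keys "en") (lastAt keys "en-us") (lastAt keys "en-gb") (lastAt keys "en-ca")
    (lastAt keys "en-au") (lastAt keys "en-orig") (minEnP keys)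

theorem lastAt_append (keys : List String) (k c : String) :
    lastAt (keys ++ [k]) c = if PySem.Str.lower k == c then some k else lastAt keys c := by
  cases h : PySem.Str.lower k == c <;> simp_all [lastAt]

theorem minEnP_append (keys : List String) (k : String) :
    minEnP (keys ++ [k]) =
      if PySem.Str.startswith (PySem.Str.lower k) "en" then updMin (minEnP keys) k
      else minEnP keys := by
  simp [minEnP, List.foldl_append]

theorem updB_F0 (a0 a1 a2 a3 a4 a5 m m' : Option String) (k : String) :
    updB (F a0 a1 a2 a3 a4 a5 m) (0, 0, "") k = F (some k) a1 a2 a3 a4 a5 m' := by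
  rcases a0 <;> rcases a1 <;> rcases a2 <;> rcases a3 <;> rcases a4 <;> rcases a5 <;> rcases m <;> first | rfl | simp [updB, F, rankLe]

theorem updB_F1 (a0 a1 a2 a3 a4 a5 m m' : Option String) (k : String) :
    updB (F a0 a1 a2 a3 a4 a5 m) (0, 1, "") k = F a0 (some k) a2 a3 a4 a5 m' := by
  rcases a0 <;> rcases a1 <;> rcases a2 <;> rcases a3 <;> rcases a4 <;> rcases a5 <;> rcases m <;> first | rfl | simp [updB, F, rankLe]

theorem updB_F2 (a0 a1 a2 a3 a4 a5 m m' : Option String) (k : String) :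
    updB (F a0 a1 a2 a3 a4 a5 m) (0, 2, "") k = F a0 a1 (some k) a3 a4 a5 m' := by
  rcases a0 <;> rcases a1 <;> rcases a2 <;> rcases a3 <;> rcases a4 <;> rcases a5 <;> rcases m <;> first | rfl | simp [updB, F, rankLe]

theorem updB_F3 (a0 a1 a2 a3 a4 a5 m m' : Option String) (k : String) :
    updB (F a0 a1 a2 a3 a4 a5 m) (0, 3, "") k = F a0 a1 a2 (some k) a4 a5 m' := by
  rcases a0 <;> rcases a1 <;> rcases a2 <;> rcases a3 <;> rcases a4 <;> rcases a5 <;> rcases m <;> first | rfl | simp [updB, F, rankLe]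

theorem updB_F4 (a0 a1 a2 a3 a4 a5 m m' : Option String) (k : String) :
    updB (F a0 a1 a2 a3 a4 a5 m) (0, 4, "") k = F a0 a1 a2 a3 (some k) a5 m' := by
  rcases a0 <;> rcases a1 <;> rcases a2 <;> rcases a3 <;> rcases a4 <;> rcases a5 <;> rcases m <;> first | rfl | simp [updB, F, rankLe]

theorem updB_F5 (a0 a1 a2 a3 a4 a5 m m' : Option String) (k : String) :
    updB (F a0 a1 a2 a3 a4 a5 m) (0, 5, "") k = F a0 a1 a2 a3 a4 (some k) m' := by
  rcases a0 <;> rcases a1 <;> rcases a2 <;> rcases a3 <;> rcases a4 <;> rcases a5 <;> rcases m <;> first | rfl | simp [updB, F, rankLe]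

theorem updB_Fen (a0 a1 a2 a3 a4 a5 m : Option String) (k : String) :
    updB (F a0 a1 a2 a3 a4 a5 m) (1, 0, k) k = F a0 a1 a2 a3 a4 a5 (updMin m k) := by
  rcases a0 <;> rcases a1 <;> rcases a2 <;> rcases a3 <;> rcases a4 <;> rcases a5 <;> rcases m <;>
    try rfl
  simp only [updB, F, updMin, rankLe]
  rename_i b
  by_cases h : k ≤ b <;> simp [h]

theorem stepB_R (keys : List String) (k : String) (v : Int) :
    stepB (R keys) (k, v) = R (keys ++ [k]) := by
  by_cases h0 : PySem.Str.lower k = "en"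
  · have e : stepB (R keys) (k, v) = updB (R keys) (0, 0, "") k := by
      simp [stepB, h0, prefB,
        show (List.idxOf? "en" ["en", "en-us", "en-gb", "en-ca", "en-au", "en-orig"]).getD 0 = 0 from rfl]
    rw [e]
    simp only [R, lastAt_append, h0]
    norm_num
    exact updB_F0 _ _ _ _ _ _ _ _ _
  by_cases h1 : PySem.Str.lower k = "en-us"
  · have e : stepB (R keys) (k, v) = updB (R keys) (0, 1, "") k := by
      simp [stepB, h1, prefB,
        show (List.idxOf? "en-us" ["en", "en-us", "en-gb", "en-ca", "en-au", "en-orig"]).getD 0 = 1 from rfl]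
    rw [e]
    simp only [R, lastAt_append, h1]
    norm_num
    exact updB_F1 _ _ _ _ _ _ _ _ _
  by_cases h2 : PySem.Str.lower k = "en-gb"
  · have e : stepB (R keys) (k, v) = updB (R keys) (0, 2, "") k := by
      simp [stepB, h2, prefB,
        show (List.idxOf? "en-gb" ["en", "en-us", "en-gb", "en-ca", "en-au", "en-orig"]).getD 0 = 2 from rfl]
    rw [e]
    simp only [R, lastAt_append, h2]
    norm_num
    exact updB_F2 _ _ _ _ _ _ _ _ _
  by_cases h3 : PySem.Str.lower k = "en-ca"
  · have e : stepB (R keys) (k, v) = updB (R keys) (0, 3, "") k := by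
      simp [stepB, h3, prefB,
        show (List.idxOf? "en-ca" ["en", "en-us", "en-gb", "en-ca", "en-au", "en-orig"]).getD 0 = 3 from rfl]
    rw [e]
    simp only [R, lastAt_append, h3]
    norm_num
    exact updB_F3 _ _ _ _ _ _ _ _ _
  by_cases h4 : PySem.Str.lower k = "en-au"
  · have e : stepB (R keys) (k, v) = updB (R keys) (0, 4, "") k := by
      simp [stepB, h4, prefB,
        show (List.idxOf? "en-au" ["en", "en-us", "en-gb", "en-ca", "en-au", "en-orig"]).getD 0 = 4 from rfl]
    rw [e]
    simp only [R, lastAt_append, h4]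
    norm_num
    exact updB_F4 _ _ _ _ _ _ _ _ _
  by_cases h5 : PySem.Str.lower k = "en-orig"
  · have e : stepB (R keys) (k, v) = updB (R keys) (0, 5, "") k := by
      simp [stepB, h5, prefB,
        show (List.idxOf? "en-orig" ["en", "en-us", "en-gb", "en-ca", "en-au", "en-orig"]).getD 0 = 5 from rfl]
    rw [e]
    simp only [R, lastAt_append, h5]
    norm_num
    exact updB_F5 _ _ _ _ _ _ _ _ _
  by_cases hen : PySem.Str.startswith (PySem.Str.lower k) "en" = true
  · have hm : PySem.Str.lower k ∉ prefB := by
      simp [prefB, h0, h1, h2, h3, h4, h5]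
    have hen' : PySem.Chars.startswith (PySem.Chars.lower k.toList) ['e', 'n'] = true := by
      simpa using hen
    have e : stepB (R keys) (k, v) = updB (R keys) (1, 0, k) k := by
      simp [stepB, hm, hen']
    rw [e]
    simp only [R, lastAt_append, minEnP_append, hen, if_true]
    norm_num [h0, h1, h2, h3, h4, h5]
    exact updB_Fen _ _ _ _ _ _ _ _
  · have hm : PySem.Str.lower k ∉ prefB := by
      simp [prefB, h0, h1, h2, h3, h4, h5]
    have hen' : PySem.Chars.startswith (PySem.Chars.lower k.toList) ['e', 'n'] = false := by
      simpa using hen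
    have e : stepB (R keys) (k, v) = R keys := by
      simp [stepB, hm, hen']
    rw [e]
    simp only [R, lastAt_append, minEnP_append, hen]
    norm_num [h0, h1, h2, h3, h4, h5]

theorem fold_R (tracks : List (String × Int)) :
    tracks.foldl stepB none = R (tracks.map Prod.fst) := by
  induction tracks using List.reverseRecOn with
  | nil => rfl
  | append_singleton ts t ih =>
      rcases t with ⟨k, v⟩
      simp only [List.foldl_append, List.foldl_cons, List.foldl_nil, ih, List.map_append,
        List.map_cons, List.map_nil]
      exact stepB_R _ _ _

theorem dict_get (keys : List String) (c : String) (d : PySem.Dict String String) :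
    (keys.foldl (fun d k => d.insert (PySem.Str.lower k) k) d).get? c =
      match lastAt keys c with
      | some k => some k
      | none => d.get? c := by
  induction keys generalizing d with
  | nil => simp [lastAt]
  | cons k ks ih =>
    rw [List.foldl_cons, ih]
    cases hA : lastAt ks c with
    | some x =>
        have h2 : lastAt (k :: ks) c = some x := by
          simp only [lastAt, List.reverse_cons] at hA ⊢
          rw [List.find?_append, hA]; rfl
        rw [h2]
    | none =>
        have h2 : lastAt (k :: ks) c =
            if PySem.Str.lower k == c then some k else none := by
          simp only [lastAt, List.reverse_cons] at hA ⊢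
          rw [List.find?_append, hA]
          by_cases hb : PySem.Str.lower k = c
          · simp [List.find?, hb]
          · simp [List.find?, beq_eq_false_iff_ne.mpr hb]
        rw [h2, PySem.Dict.get?_insert]
        by_cases hc : c = PySem.Str.lower k
        · simp [hc]
        · have : (PySem.Str.lower k == c) = false := by
            simp only [beq_eq_false_iff_ne]
            exact fun h => hc h.symm
          simp [hc, this]

theorem lastAt_some_ne_empty (keys : List String) (c x : String)
    (h : lastAt keys c = some x) (hc : c ≠ "") : x ≠ "" := by
  intro hx
  have := List.find?_some h
  rw [hx] at this
  simp only [beq_iff_eq] at this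
  exact hc (this ▸ rfl)

theorem minEnP_eq_filter_foldl (keys : List String) :
    minEnP keys =
      (keys.filter (fun k => PySem.Str.startswith (PySem.Str.lower k) "en")).foldl updMin none := by
  rw [minEnP, List.foldl_filter]

theorem foldl_updMin_some (t : List String) (b : String) :
    t.foldl updMin (some b) = some (t.foldl (fun b k => if k ≤ b then k else b) b) := by
  induction t generalizing b with
  | nil => rfl
  | cons x t ih => simp only [List.foldl_cons, updMin]; split <;> exact ih _

theorem if_le_eq_min (b k : String) : (if k ≤ b then k else b) = min b k := by
  by_cases h : k ≤ b
  · by_cases h2 : b ≤ k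
    · rw [if_pos h, min_def, if_pos h2]
      exact le_antisymm h h2
    · rw [if_pos h, min_def, if_neg h2]
  · rw [if_neg h, min_def, if_pos (not_le.mp h).le]

theorem fallback_eq (keys : List String) :
    (match PySem.List.sorted
        (keys.filter (fun k => PySem.Str.startswith (PySem.Str.lower k) "en"))
        (fun x => x) false with
      | [] => none
      | k :: _ => some k) = minEnP keys := by
  rw [minEnP_eq_filter_foldl]
  set l := keys.filter (fun k => PySem.Str.startswith (PySem.Str.lower k) "en") with hl
  clear_value l
  cases hl2 : l with
  | nil => rfl
  | cons x t =>
    cases hs : PySem.List.sorted (x :: t) (fun x => x) false with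
    | nil => exact absurd ((PySem.List.sorted_eq_nil_iff _ _ _).mp hs) (by simp)
    | cons m t' =>
      show some m = List.foldl updMin none (x :: t)
      simp only [List.foldl_cons]
      have hu : updMin none x = some x := rfl
      rw [hu, foldl_updMin_some]
      have hv : t.foldl (fun b k => if k ≤ b then k else b) x = t.foldl min x := by
        have : (fun (b k : String) => if k ≤ b then k else b) = fun b k => min b k := by
          funext b k; exact if_le_eq_min b k
        rw [this]
      rw [hv]
      have hmm : m ∈ x :: t := by
        have := PySem.List.mem_sorted (xs := x :: t) (key := fun x => x) (rev := false) (x := m)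
        rw [hs] at this
        exact this.mp (List.mem_cons_self)
      have hle : ∀ y ∈ x :: t, m ≤ y := PySem.List.key_head_sorted_le _ _ hs
      have hvle := PySem.List.foldl_min_le t x
      have hvmem := PySem.List.foldl_min_mem t x
      have hvm : t.foldl min x ∈ x :: t := by
        rcases hvmem with h | h
        · rw [h]; exact List.mem_cons_self
        · exact List.mem_cons_of_mem _ h
      have h1 : m ≤ t.foldl min x := hle _ hvm
      have h2 : t.foldl min x ≤ m := by
        rcases hmm with _ | hmm2
        · exact hvle.1
        · exact hvle.2 _ (by assumption)
      rw [le_antisymm h1 h2]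

theorem A_eq_R (tracks : List (String × Int)) :
    pick_best_english_lang tracks = (R (tracks.map Prod.fst)).map (fun p => p.2) := by
  by_cases hk : tracks.map Prod.fst = []
  · simp [pick_best_english_lang, hk, R, lastAt, minEnP, F]
  · have hget : ∀ c, ((tracks.map Prod.fst).foldl
        (fun d k => d.insert (PySem.Str.lower k) k) PySem.Dict.empty).get? c =
        lastAt (tracks.map Prod.fst) c := by
      intro c
      rw [dict_get]
      cases lastAt (tracks.map Prod.fst) c <;> simp
    simp only [pick_best_english_lang, if_neg hk, prefLoopA,
      (by decide : PySem.Str.lower "en" = "en"),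
      (by decide : PySem.Str.lower "en-US" = "en-us"),
      (by decide : PySem.Str.lower "en-GB" = "en-gb"),
      (by decide : PySem.Str.lower "en-CA" = "en-ca"),
      (by decide : PySem.Str.lower "en-AU" = "en-au"),
      (by decide : PySem.Str.lower "en-orig" = "en-orig"),
      hget]
    cases hA0 : lastAt (tracks.map Prod.fst) "en" with
    | some x =>
        simp [lastAt_some_ne_empty _ _ _ hA0 (by decide), R, F, hA0]
    | none =>
    cases hA1 : lastAt (tracks.map Prod.fst) "en-us" with
    | some x =>
        simp [lastAt_some_ne_empty _ _ _ hA1 (by decide), R, F, hA0, hA1]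
    | none =>
    cases hA2 : lastAt (tracks.map Prod.fst) "en-gb" with
    | some x =>
        simp [lastAt_some_ne_empty _ _ _ hA2 (by decide), R, F, hA0, hA1, hA2]
    | none =>
    cases hA3 : lastAt (tracks.map Prod.fst) "en-ca" with
    | some x =>
        simp [lastAt_some_ne_empty _ _ _ hA3 (by decide), R, F, hA0, hA1, hA2, hA3]
    | none =>
    cases hA4 : lastAt (tracks.map Prod.fst) "en-au" with
    | some x =>
        simp [lastAt_some_ne_empty _ _ _ hA4 (by decide), R, F, hA0, hA1, hA2, hA3, hA4]
    | none =>
    cases hA5 : lastAt (tracks.map Prod.fst) "en-orig" with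
    | some x =>
        simp [lastAt_some_ne_empty _ _ _ hA5 (by decide), R, F, hA0, hA1, hA2, hA3, hA4, hA5]
    | none =>
    rw [fallback_eq]
    cases hm : minEnP (tracks.map Prod.fst) <;>
      simp [R, F, hA0, hA1, hA2, hA3, hA4, hA5, hm]

-- ===== VERDICT (by name: the statement is the Claim_ definition above) =====
theorem pick_best_english_lang_spec : Claim_equal_pick_best_english_lang := by
  intro tracks _
  unfold Spec_pick_best_english_lang pick_best_english_lang_alt
  rw [A_eq_R, fold_R]
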